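-- pv_equiv track=rewrite | github.com/olartgabo/NotesVault | uni/algo/grupo/medicion.py | selection_sort_iterativo
-- ===== SOURCE A (Python) =====
-- def selection_sort_iterativo(arr):
--     n = len(arr)
--     comparaciones = 0
--     intercambios = 0
--     a = arr[:]
--     for i in range(n - 1):
--         min_idx = i
--         for j in range(i + 1, n):
--             comparaciones += 1
--             if a[j] < a[min_idx]:
--                 min_idx = j
--         if min_idx != i:
--             a[i], a[min_idx] = a[min_idx], a[i]
--             intercambios += 1
--     return comparaciones, intercambios, 0   # llamadas recursivas = N/A
-- ===== SOURCE B (Python) =====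
-- def selection_sort_iterativo(arr):
--     n = len(arr)
--     comparaciones = n * (n - 1) // 2
--     intercambios = 0
--     a = list(arr)
--     while len(a) > 1:
--         k = a.index(min(a))
--         if k != 0:
--             a[k] = a[0]
--             intercambios += 1
--         a = a[1:]
--     return comparaciones, intercambios, 0
-- ===== Notes on version B (the rewrite author's own statement) =====
-- stated objective: alternative
-- what changed: comparisons come from the closed form n(n-1)//2 instead of being counted in a nested loop, and swaps are counted by a single shrinking-list loop that finds the leftmost minimum with min()/list.index(), writes the displaced head over it and drops the head, instead of A's hand-written index scan with simultaneous swap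
import Mathlib
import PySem

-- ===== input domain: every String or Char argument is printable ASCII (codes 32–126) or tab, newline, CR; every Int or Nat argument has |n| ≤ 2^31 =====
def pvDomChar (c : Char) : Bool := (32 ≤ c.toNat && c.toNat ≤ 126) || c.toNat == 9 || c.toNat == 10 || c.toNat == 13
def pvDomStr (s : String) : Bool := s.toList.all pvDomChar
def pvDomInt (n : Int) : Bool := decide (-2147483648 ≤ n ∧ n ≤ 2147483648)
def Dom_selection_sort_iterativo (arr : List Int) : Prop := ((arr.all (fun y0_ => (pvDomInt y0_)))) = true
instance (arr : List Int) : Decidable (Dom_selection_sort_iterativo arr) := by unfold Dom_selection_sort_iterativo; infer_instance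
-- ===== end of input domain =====

-- B replaces A's counting loops: comparisons by the closed form n(n-1)//2, and swaps by a
-- single shrinking-list loop over the leftmost minimum (min/index); same asymptotic cost.

-- ===== PORT A =====
-- body of A's inner 'for j in range(i+1, n)' loop; state = (comparaciones, min_idx)
def sswInner (a : List Int) (st : Int × Int) (j : Int) : Int × Int :=
  let comparaciones := st.1 + 1
  if PySem.List.pyGetD a j 0 < PySem.List.pyGetD a st.2 0 then (comparaciones, j)
  else (comparaciones, st.2)

-- body of A's outer 'for i in range(n-1)' loop; state = (comparaciones, intercambios, a)
def sswOuter (n : Int) (st : Int × Int × List Int) (i : Int) : Int × Int × List Int :=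
  let a := st.2.2
  let r := (PySem.List.pyRange (i + 1) n 1).foldl (sswInner a) (st.1, i)
  let min_idx := r.2
  if min_idx ≠ i then
    (r.1, st.2.1 + 1,
      PySem.List.pySetD (PySem.List.pySetD a i (PySem.List.pyGetD a min_idx 0)) min_idx
        (PySem.List.pyGetD a i 0))
  else (r.1, st.2.1, a)

def selection_sort_iterativo (arr : List Int) : Int × Int × Int :=
  let n : Int := arr.length
  let r := (PySem.List.pyRange 0 (n - 1) 1).foldl (sswOuter n) (0, 0, arr)
  (r.1, r.2.1, 0)

-- ===== PORT B =====
-- B's 'while len(a) > 1' loop: find the leftmost minimum, overwrite it with the head, drop the head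
def altLoop (a : List Int) (intercambios : Int) : Int :=
  match a with
  | [] => intercambios
  | [_] => intercambios
  | x :: xs =>
      let m := (PySem.List.min? (x :: xs) (fun y => y)).getD 0
      let k := (PySem.List.index? (x :: xs) m).getD 0
      if k ≠ 0 then altLoop (xs.set (k - 1) x) (intercambios + 1)
      else altLoop xs intercambios
termination_by a.length
decreasing_by all_goals simp

def selection_sort_iterativo_alt (arr : List Int) : Int × Int × Int :=
  let n : Int := arr.length
  (PySem.Int.floordiv (n * (n - 1)) 2, altLoop arr 0, 0)

-- ===== PRECONDITION & SPEC =====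
def Spec_selection_sort_iterativo (arr : List Int) (out : Int × Int × Int) : Prop := out = selection_sort_iterativo_alt arr
instance (arr : List Int) (out : Int × Int × Int) : Decidable (Spec_selection_sort_iterativo arr out) := by unfold Spec_selection_sort_iterativo; infer_instance

-- ===== CLAIM (what is proved, stated in full; the proofs are below) =====
def Claim_equal_selection_sort_iterativo : Prop := ∀ (arr : List Int), Dom_selection_sort_iterativo arr → Spec_selection_sort_iterativo arr (selection_sort_iterativo arr)

-- ===== LEMMAS AND PROOFS =====

-- leftmost index of the minimum of a list (0 for [])
def idxm : List Int → Nat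
  | [] => 0
  | x :: t => if t.any (fun z => z < x) then idxm t + 1 else 0

-- triangular count Tn k = 0 + 1 + … + (k-1): A's total number of comparisons on k elements
def Tn : Nat → Int
  | 0 => 0
  | k + 1 => k + Tn k

lemma getD_append_len (pre : List Int) (z : Int) (t : List Int) (d : Int) :
    (pre ++ z :: t).getD pre.length d = z := by
  simp [List.getD]

lemma getD_append_add (pre l : List Int) (d : Int) (n : Nat) :
    (pre ++ l).getD (pre.length + n) d = l.getD n d := by
  simp [List.getD, List.getElem?_append_right]

lemma set_append_add (pre : List Int) (x : Int) (r : List Int) (n : Nat) :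
    (pre ++ r).set (pre.length + n) x = pre ++ r.set n x := by
  simp

lemma getD_append_lt (p : Nat) (pre l : List Int) (d : Int) (h : p < pre.length) :
    (pre ++ l).getD p d = pre.getD p d := by
  simp [List.getD, List.getElem?_append_left, h]

lemma foldl_min_swap (t : List Int) (a b : Int) :
    t.foldl min (min a b) = min a (t.foldl min b) := by
  induction t generalizing b with
  | nil => rfl
  | cons z t ih => simp only [List.foldl_cons, min_assoc, ih]

lemma foldl_min_of_not_any (t : List Int) (x : Int) (h : ¬ t.any (fun z => z < x) = true) :
    t.foldl min x = x := by
  induction t with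
  | nil => rfl
  | cons z t ih =>
      simp only [List.any_cons, Bool.or_eq_true, decide_eq_true_eq, not_or] at h
      simp only [List.foldl_cons, min_eq_left (by omega : x ≤ z)]
      exact ih (by simpa using h.2)

lemma foldl_min_le_of_any (t : List Int) (x : Int) (h : t.any (fun z => z < x) = true) :
    t.foldl min x < x := by
  simp only [List.any_eq_true, decide_eq_true_eq] at h
  obtain ⟨z, hz, hlt⟩ := h
  exact lt_of_le_of_lt ((PySem.List.foldl_min_le t x).2 z hz) hlt

-- the value sitting at the leftmost-minimum index is the running minimum
lemma getD_idxm (xs : List Int) (x : Int) :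
    (x :: xs).getD (if xs.any (fun z => z < x) then idxm xs + 1 else 0) 0
      = xs.foldl min x := by
  induction xs generalizing x with
  | nil => simp
  | cons y t ih =>
      by_cases hx : (y :: t).any (fun z => z < x) = true
      · rw [if_pos hx]
        have hM : t.foldl min y ≤ x := by
          simp only [List.any_cons, List.any_eq_true, Bool.or_eq_true, decide_eq_true_eq] at hx
          rcases hx with hy | ⟨z, hz, hlt⟩
          · exact le_of_lt (lt_of_le_of_lt (PySem.List.foldl_min_le t y).1 hy)
          · exact le_of_lt (lt_of_le_of_lt ((PySem.List.foldl_min_le t y).2 z hz) hlt)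
        have hgoal : (x :: y :: t).getD (idxm (y :: t) + 1) 0 = t.foldl min y := by
          have := ih y
          simpa [idxm] using this
        rw [hgoal, List.foldl_cons, foldl_min_swap, min_eq_right hM]
      · rw [if_neg hx]
        simp only [List.any_cons, Bool.or_eq_true, decide_eq_true_eq, not_or] at hx
        have h1 : min x y = x := min_eq_left (by omega)
        have h2 : t.foldl min x = x :=
          foldl_min_of_not_any t x (by simpa using hx.2)
        simp only [List.getD_cons_zero, List.foldl_cons, h1, h2]

-- list.index of the minimum is the leftmost-minimum index
lemma index?_min (xs : List Int) (x : Int) :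
    PySem.List.index? (x :: xs) (xs.foldl min x)
      = some (if xs.any (fun z => z < x) then idxm xs + 1 else 0) := by
  induction xs generalizing x with
  | nil => simp
  | cons y t ih =>
      by_cases hx : (y :: t).any (fun z => z < x) = true
      · have hlt : (y :: t).foldl min x < x := foldl_min_le_of_any _ _ hx
        have hM : t.foldl min y ≤ x := by
          rw [List.foldl_cons, foldl_min_swap] at hlt
          rcases min_lt_iff.mp hlt with h | h <;> omega
        have hfold : (y :: t).foldl min x = t.foldl min y := by
          rw [List.foldl_cons, foldl_min_swap, min_eq_right hM]
        have hne : x ≠ (y :: t).foldl min x := by omega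
        rw [PySem.List.index?_cons_of_ne _ hne, hfold, ih y, if_pos hx]
        simp only [Option.map, idxm]
      · have hfx : (y :: t).foldl min x = x := foldl_min_of_not_any _ _ hx
        rw [hfx, PySem.List.index?_cons_self, if_neg hx]

-- min() yields the running minimum
lemma min?_run (xs : List Int) (x : Int) :
    ((PySem.List.min? (x :: xs) (fun y => y)).getD 0) = xs.foldl min x := by
  rw [PySem.List.min?_id_cons]; rfl

-- inner-loop characterisation: A's scan over a[s:] starting from candidate index p (value v)
lemma inner_spec (l : List Int) : ∀ (pre : List Int) (p : Nat) (v c : Int),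
    p < pre.length → pre.getD p 0 = v →
    (PySem.List.pyRange (pre.length : Int) (((pre ++ l).length : Int)) 1).foldl
        (sswInner (pre ++ l)) (c, (p : Int))
      = (c + l.length,
         if l.any (fun z => z < v) then ((pre.length + idxm l : Nat) : Int) else (p : Int)) := by
  induction l with
  | nil =>
      intro pre p v c hp hv
      rw [List.append_nil, PySem.List.pyRange_one_eq_nil (le_refl _)]
      simp
  | cons z t ih =>
      intro pre p v c hp hv
      have hs : (pre.length : Int) < ((pre ++ z :: t).length : Int) := by
        simp only [List.length_append, List.length_cons]; push_cast; omega
      rw [PySem.List.pyRange_one_cons hs, List.foldl_cons]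
      have ha_s : PySem.List.pyGetD (pre ++ z :: t) (pre.length : Int) 0 = z := by
        rw [PySem.List.pyGetD_natCast]; exact getD_append_len pre z t 0
      have ha_p : PySem.List.pyGetD (pre ++ z :: t) (p : Int) 0 = v := by
        rw [PySem.List.pyGetD_natCast, getD_append_lt p pre (z :: t) 0 hp, hv]
      have hstep : sswInner (pre ++ z :: t) (c, (p : Int)) (pre.length : Int)
          = (c + 1, if z < v then (pre.length : Int) else (p : Int)) := by
        simp only [sswInner, ha_s, ha_p]
        split_ifs <;> rfl
      rw [hstep]
      have hre : pre ++ z :: t = (pre ++ [z]) ++ t := by simp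
      have hlo : (pre.length : Int) + 1 = (((pre ++ [z]).length : Nat) : Int) := by
        simp [List.length_append]
      by_cases hzv : z < v
      · rw [if_pos hzv]
        have hv' : (pre ++ [z]).getD pre.length 0 = z := getD_append_len pre z [] 0
        have hIH := ih (pre ++ [z]) pre.length z (c + 1)
          (by simp [List.length_append]) hv'
        rw [hre, hlo, hIH]
        have hany : ((z :: t).any fun w => w < v) = true := by simp [hzv]
        rw [if_pos hany]
        by_cases h2 : (t.any fun w => w < z) = true
        · rw [if_pos h2]
          simp only [idxm, if_pos h2, Prod.mk.injEq, List.length_append, List.length_cons, List.length_nil]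
          exact ⟨by push_cast; ring, by push_cast; omega⟩
        · rw [if_neg h2]
          simp only [idxm, if_neg h2, Prod.mk.injEq, List.length_cons]
          exact ⟨by push_cast; ring, by push_cast; omega⟩
      · rw [if_neg hzv]
        have hv' : (pre ++ [z]).getD p 0 = v := by
          rw [getD_append_lt p pre [z] 0 hp]; exact hv
        have hIH := ih (pre ++ [z]) p v (c + 1)
          (by simp only [List.length_append, List.length_cons, List.length_nil]; omega) hv'
        rw [hre, hlo, hIH]
        by_cases h2 : (t.any fun w => w < v) = true
        · have hany : ((z :: t).any fun w => w < v) = true := by simp [h2]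
          rw [if_pos h2, if_pos hany]
          have h3 : (t.any fun w => w < z) = true := by
            simp only [List.any_eq_true, decide_eq_true_eq] at h2 ⊢
            obtain ⟨w, hw, hlt⟩ := h2; exact ⟨w, hw, by omega⟩
          simp only [idxm, if_pos h3, Prod.mk.injEq, List.length_append, List.length_cons, List.length_nil]
          exact ⟨by push_cast; ring, by push_cast; omega⟩
        · have hany : ¬ ((z :: t).any fun w => w < v) = true := by simp [hzv, h2]
          rw [if_neg h2, if_neg hany]
          simp only [Prod.mk.injEq, List.length_cons]
          exact ⟨by push_cast; ring, by trivial⟩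

-- outer-loop characterisation: A's remaining passes count B's altLoop swaps on the suffix
lemma outer_spec (k : Nat) : ∀ (l pre : List Int), l.length = k → ∀ (c sw : Int),
    ∃ l' : List Int, l'.length = k ∧
    (PySem.List.pyRange (pre.length : Int) (((pre.length + k : Nat) : Int) - 1) 1).foldl
        (sswOuter ((pre.length + k : Nat) : Int)) (c, sw, pre ++ l)
      = (c + Tn k, altLoop l sw, pre ++ l') := by
  induction k with
  | zero =>
      intro l pre hl c sw
      have hl0 : l = [] := List.length_eq_zero_iff.mp hl
      subst hl0
      refine ⟨[], rfl, ?_⟩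
      rw [PySem.List.pyRange_one_eq_nil (by push_cast; omega)]
      simp [altLoop, Tn]
  | succ k ih =>
      intro l pre hl c sw
      obtain ⟨x, xs, rfl⟩ : ∃ x xs, l = x :: xs := by
        cases l with
        | nil => simp at hl
        | cons a b => exact ⟨a, b, rfl⟩
      have hxs : xs.length = k := by simpa using hl
      by_cases hk : k = 0
      · subst hk
        have hxs0 : xs = [] := List.length_eq_zero_iff.mp hxs
        subst hxs0
        refine ⟨[x], rfl, ?_⟩
        rw [PySem.List.pyRange_one_eq_nil (by push_cast; omega)]
        simp [altLoop, Tn]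
      · have hxsne : xs ≠ [] := by rintro rfl; simp at hxs; omega
        rw [PySem.List.pyRange_one_cons (by push_cast; omega), List.foldl_cons]
        have hre : pre ++ x :: xs = (pre ++ [x]) ++ xs := by simp
        have hlo : (pre.length : Int) + 1 = (((pre ++ [x]).length : Nat) : Int) := by
          simp [List.length_append]
        have hn : ((pre.length + (k + 1) : Nat) : Int) = (((pre ++ [x]) ++ xs).length : Int) := by
          simp only [List.length_append, List.length_cons, List.length_nil]
          push_cast; omega
        have hv' : (pre ++ [x]).getD pre.length 0 = x := getD_append_len pre x [] 0
        have hinner := inner_spec xs (pre ++ [x]) pre.length x c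
          (by simp [List.length_append]) hv'
        by_cases hany : (xs.any fun z => z < x) = true
        · -- a strictly smaller element exists to the right: A swaps, B counts a swap
          have hfold : (PySem.List.pyRange ((pre.length : Int) + 1)
                ((pre.length + (k + 1) : Nat) : Int) 1).foldl
                (sswInner (pre ++ x :: xs)) (c, (pre.length : Int))
              = (c + (xs.length : Int), ((pre.length + 1 + idxm xs : Nat) : Int)) := by
            rw [hre, hlo, hn, hinner, if_pos hany]
            simp only [List.length_append, List.length_singleton]
          have hne : ((pre.length + 1 + idxm xs : Nat) : Int) ≠ (pre.length : Int) := by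
            push_cast; omega
          have g1 : PySem.List.pyGetD (pre ++ x :: xs) ((pre.length + 1 + idxm xs : Nat) : Int) 0
              = xs.getD (idxm xs) 0 := by
            rw [PySem.List.pyGetD_natCast,
              show pre.length + 1 + idxm xs = pre.length + (idxm xs + 1) by omega,
              getD_append_add pre (x :: xs) 0 (idxm xs + 1), List.getD_cons_succ]
          have g2 : PySem.List.pyGetD (pre ++ x :: xs) (pre.length : Int) 0 = x := by
            rw [PySem.List.pyGetD_natCast]; exact getD_append_len pre x xs 0
          have hmv : xs.getD (idxm xs) 0 = xs.foldl min x := by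
            have := getD_idxm xs x
            rw [if_pos hany, List.getD_cons_succ] at this
            exact this
          have s1 : PySem.List.pySetD (pre ++ x :: xs) ((pre.length : Nat) : Int) (xs.getD (idxm xs) 0)
              = pre ++ xs.getD (idxm xs) 0 :: xs := by
            rw [PySem.List.pySetD_natCast]
            simpa using set_append_add pre (xs.getD (idxm xs) 0) (x :: xs) 0
          have s2 : PySem.List.pySetD (pre ++ xs.getD (idxm xs) 0 :: xs)
                ((pre.length + 1 + idxm xs : Nat) : Int) x
              = pre ++ xs.getD (idxm xs) 0 :: xs.set (idxm xs) x := by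
            rw [PySem.List.pySetD_natCast,
              show pre.length + 1 + idxm xs = pre.length + (idxm xs + 1) by omega,
              set_append_add pre x (xs.getD (idxm xs) 0 :: xs) (idxm xs + 1)]
            simp
          have hstep : sswOuter ((pre.length + (k + 1) : Nat) : Int)
                (c, sw, pre ++ x :: xs) (pre.length : Int)
              = (c + (xs.length : Int), sw + 1,
                 pre ++ xs.getD (idxm xs) 0 :: xs.set (idxm xs) x) := by
            simp only [sswOuter]
            rw [hfold]
            dsimp only
            rw [if_pos hne, g1, g2, s1, s2]
          rw [hstep]
          obtain ⟨l'', hlen'', heq''⟩ := ih (xs.set (idxm xs) x) (pre ++ [xs.getD (idxm xs) 0])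
            (by simp [hxs]) (c + (xs.length : Int)) (sw + 1)
          have e1 : ((pre ++ [xs.getD (idxm xs) 0]).length : Int) = (pre.length : Int) + 1 := by
            simp [List.length_append]
          have e2 : (((pre ++ [xs.getD (idxm xs) 0]).length + k : Nat) : Int)
              = ((pre.length + (k + 1) : Nat) : Int) := by
            simp only [List.length_append, List.length_cons, List.length_nil]; push_cast; omega
          rw [e1, e2] at heq''
          have e3 : (pre ++ [xs.getD (idxm xs) 0]) ++ xs.set (idxm xs) x
              = pre ++ xs.getD (idxm xs) 0 :: xs.set (idxm xs) x := by simp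
          rw [e3] at heq''
          rw [heq'']
          refine ⟨xs.getD (idxm xs) 0 :: l'', by simp [hlen''], ?_⟩
          have halt : altLoop (x :: xs) sw = altLoop (xs.set (idxm xs) x) (sw + 1) := by
            obtain ⟨y, t, rfl⟩ : ∃ y t, xs = y :: t := by
              cases xs with
              | nil => exact absurd rfl hxsne
              | cons a b => exact ⟨a, b, rfl⟩
            simp only [altLoop]
            rw [min?_run, index?_min, if_pos hany]
            simp
          rw [halt]
          simp only [Prod.mk.injEq, hxs, Tn]
          exact ⟨by ring, by trivial, by simp⟩
        · -- the head is already minimal: A does not swap, B recurses without counting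
          have hfold : (PySem.List.pyRange ((pre.length : Int) + 1)
                ((pre.length + (k + 1) : Nat) : Int) 1).foldl
                (sswInner (pre ++ x :: xs)) (c, (pre.length : Int))
              = (c + (xs.length : Int), (pre.length : Int)) := by
            rw [hre, hlo, hn, hinner, if_neg hany]
          have hstep : sswOuter ((pre.length + (k + 1) : Nat) : Int)
                (c, sw, pre ++ x :: xs) (pre.length : Int)
              = (c + (xs.length : Int), sw, pre ++ x :: xs) := by
            simp only [sswOuter]
            rw [hfold]
            dsimp only
            rw [if_neg (by simp)]
          rw [hstep]
          obtain ⟨l'', hlen'', heq''⟩ := ih xs (pre ++ [x]) hxs (c + (xs.length : Int)) sw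
          have e1 : ((pre ++ [x]).length : Int) = (pre.length : Int) + 1 := by
            simp [List.length_append]
          have e2 : (((pre ++ [x]).length + k : Nat) : Int)
              = ((pre.length + (k + 1) : Nat) : Int) := by
            simp only [List.length_append, List.length_cons, List.length_nil]; push_cast; omega
          rw [e1, e2, ← hre] at heq''
          rw [heq'']
          refine ⟨x :: l'', by simp [hlen''], ?_⟩
          have halt : altLoop (x :: xs) sw = altLoop xs sw := by
            obtain ⟨y, t, rfl⟩ : ∃ y t, xs = y :: t := by
              cases xs with
              | nil => exact absurd rfl hxsne
              | cons a b => exact ⟨a, b, rfl⟩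
            simp only [altLoop]
            rw [min?_run, index?_min, if_neg hany]
            simp
          rw [halt]
          simp only [Prod.mk.injEq, hxs, Tn]
          exact ⟨by ring, by trivial, by simp⟩

lemma Tn_eq (k : Nat) : Tn k = ((k * (k - 1) / 2 : Nat) : Int) := by
  induction k with
  | zero => simp [Tn]
  | succ k ih =>
      have h2 : (k + 1) * k = k * (k - 1) + 2 * k := by
        cases k with
        | zero => rfl
        | succ m => simp; ring
      have h3 : (k + 1) * k / 2 = k * (k - 1) / 2 + k := by
        rw [h2, Nat.add_mul_div_left _ _ (by norm_num : 0 < 2)]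
      simp only [Tn, ih, Nat.add_sub_cancel]
      rw [h3]; push_cast; ring

lemma floordiv_tri (k : Nat) :
    PySem.Int.floordiv ((k : Int) * ((k : Int) - 1)) 2 = ((k * (k - 1) / 2 : Nat) : Int) := by
  cases k with
  | zero => decide
  | succ m =>
      have h : ((m + 1 : Nat) : Int) * (((m + 1 : Nat) : Int) - 1) = (((m + 1) * m : Nat) : Int) := by
        push_cast; ring
      rw [h]
      simp

-- ===== VERDICT (by name: the statement is the Claim_ definition above) =====
theorem selection_sort_iterativo_spec : Claim_equal_selection_sort_iterativo := by
  intro arr _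
  unfold Spec_selection_sort_iterativo
  obtain ⟨l', hlen, heq⟩ := outer_spec arr.length arr [] rfl 0 0
  simp only [List.length_nil, Nat.zero_add, List.nil_append, Nat.cast_zero] at heq
  simp only [selection_sort_iterativo, selection_sort_iterativo_alt, heq]
  rw [Tn_eq, floordiv_tri]
  simp
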